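-- pv_equiv track=rewrite | github.com/resulsrky/python_media_engine | resilience.py | _gf256_inverse
-- ===== SOURCE A (Python) =====
-- def _gf256_inverse(a: int) -> int:
--     """GF(256) üzerinde modular inverse hesaplar"""
--     # Extended Euclidean algorithm
--     if a == 0:
--         return 0
--
--     # GF(256) için a^254 = a^-1 (Fermat's little theorem)
--     result = 1
--     power = 254
--     base = a
--
--     while power > 0:
--         if power & 1:
--             result = (result * base) % 257
--         base = (base * base) % 257
--         power >>= 1
--
--     return result % 256
-- ===== SOURCE B (Python) =====
-- def _gf256_inverse(a: int) -> int:
--     """GF(256) uzerinde modular inverse hesaplar"""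
--     if a == 0:
--         return 0
--     # a^254 = a^-1 mod 257 (Fermat), computed by 254 plain modular multiplications
--     result = 1
--     for _ in range(254):
--         result = (result * a) % 257
--     return result % 256
-- ===== Notes on version B (the rewrite author's own statement) =====
-- stated objective: simpler
-- what changed: Replaces the binary square-and-multiply exponentiation loop (bit tests, squaring, shifting state) with a straight-line loop of 254 modular multiplications computing a^254 mod 257 directly.
import Mathlib
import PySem

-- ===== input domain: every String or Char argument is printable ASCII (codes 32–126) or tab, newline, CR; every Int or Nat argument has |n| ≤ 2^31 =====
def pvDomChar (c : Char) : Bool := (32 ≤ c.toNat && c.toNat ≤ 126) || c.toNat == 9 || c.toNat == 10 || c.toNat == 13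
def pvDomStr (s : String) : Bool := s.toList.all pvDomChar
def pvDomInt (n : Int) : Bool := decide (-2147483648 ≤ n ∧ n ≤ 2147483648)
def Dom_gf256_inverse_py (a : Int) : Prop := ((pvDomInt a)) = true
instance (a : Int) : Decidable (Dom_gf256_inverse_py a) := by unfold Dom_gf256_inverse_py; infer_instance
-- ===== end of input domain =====

-- B replaces A's binary square-and-multiply exponentiation with a straight loop of
-- 254 modular multiplications; same value a^254 mod 257 (then mod 256) everywhere.

-- ===== PORT A =====
-- A's while-loop: state (result, base), power halves each step (power >>= 1; power & 1 = power % 2)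
def gf256Loop (result base : Int) (power : Nat) : Int :=
  if power = 0 then result
  else
    gf256Loop (if power % 2 = 1 then PySem.Int.mod (result * base) 257 else result)
      (PySem.Int.mod (base * base) 257) (power / 2)
termination_by power
decreasing_by exact Nat.div_lt_self (Nat.pos_of_ne_zero (by omega)) (by omega)

def gf256_inverse_py (a : Int) : Int :=
  if a = 0 then 0
  else PySem.Int.mod (gf256Loop 1 a 254) 256

-- ===== PORT B =====
def gf256_inverse_py_alt (a : Int) : Int :=
  if a = 0 then 0
  else PySem.Int.mod ((List.range 254).foldl (fun r _ => PySem.Int.mod (r * a) 257) 1) 256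

-- ===== PRECONDITION & SPEC =====
def Spec_gf256_inverse_py (a : Int) (out : Int) : Prop := out = gf256_inverse_py_alt a
instance (a : Int) (out : Int) : Decidable (Spec_gf256_inverse_py a out) := by unfold Spec_gf256_inverse_py; infer_instance

-- ===== CLAIM (what is proved, stated in full; the proofs are below) =====
def Claim_equal_gf256_inverse_py : Prop := ∀ (a : Int), Dom_gf256_inverse_py a → Spec_gf256_inverse_py a (gf256_inverse_py a)

-- ===== LEMMAS AND PROOFS =====

theorem pv_modeq (x : Int) : Int.ModEq 257 (x % 257) x := Int.emod_emod_of_dvd x dvd_rfl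

-- A's loop computes r * b^p mod 257 (for p ≥ 1)
theorem gf256Loop_eq (p : Nat) (hp : 1 ≤ p) (r b : Int) :
    gf256Loop r b p = r * b ^ p % 257 := by
  induction p using Nat.strong_induction_on generalizing r b with
  | _ p ih =>
    have hne : ¬ p = 0 := by omega
    rw [gf256Loop]
    simp only [hne, if_false, PySem.Int.mod_eq_emod_of_pos (show (0:Int) < 257 by norm_num)]
    by_cases hq0 : p / 2 = 0
    · -- p = 1
      have hp1 : p = 1 := by omega
      subst hp1
      rw [gf256Loop]
      norm_num
    · have hlt : p / 2 < p := Nat.div_lt_self (by omega) (by omega)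
      rw [ih (p / 2) hlt (by omega)]
      generalize hqg : p / 2 = q
      by_cases hodd : p % 2 = 1
      · simp only [hodd, if_true]
        have hpe : p = 2 * q + 1 := by omega
        show Int.ModEq 257 (r * b % 257 * (b * b % 257) ^ q) (r * b ^ p)
        calc r * b % 257 * (b * b % 257) ^ q
            ≡ r * b * (b * b) ^ q [ZMOD 257] :=
              (pv_modeq (r * b)).mul ((pv_modeq (b * b)).pow q)
          _ = r * b ^ p := by rw [hpe]; ring
      · simp only [hodd, if_false]
        have hpe : p = 2 * q := by omega
        show Int.ModEq 257 (r * (b * b % 257) ^ q) (r * b ^ p)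
        calc r * (b * b % 257) ^ q
            ≡ r * (b * b) ^ q [ZMOD 257] :=
              (Int.ModEq.refl r).mul ((pv_modeq (b * b)).pow q)
          _ = r * b ^ p := by rw [hpe]; ring

-- B's loop computes r * a^n mod 257 (for n ≥ 1)
theorem linLoop_eq (a : Int) (n : Nat) (hn : 1 ≤ n) (r : Int) :
    (List.range n).foldl (fun s _ => PySem.Int.mod (s * a) 257) r = r * a ^ n % 257 := by
  induction n generalizing r with
  | zero => omega
  | succ m ihm =>
    rw [List.range_succ, List.foldl_append]
    by_cases hm : m = 0
    · subst hm
      simp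
    · rw [ihm (by omega)]
      simp only [List.foldl_cons, List.foldl_nil,
        PySem.Int.mod_eq_emod_of_pos (show (0:Int) < 257 by norm_num)]
      show Int.ModEq 257 (r * a ^ m % 257 * a) (r * a ^ (m + 1))
      calc r * a ^ m % 257 * a
          ≡ r * a ^ m * a [ZMOD 257] := (pv_modeq (r * a ^ m)).mul (Int.ModEq.refl a)
        _ = r * a ^ (m + 1) := by ring

-- ===== VERDICT (by name: the statement is the Claim_ definition above) =====
theorem gf256_inverse_py_spec : Claim_equal_gf256_inverse_py := by
  intro a _
  unfold Spec_gf256_inverse_py gf256_inverse_py gf256_inverse_py_alt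
  by_cases h : a = 0
  · simp [h]
  · simp only [h, if_false]
    rw [gf256Loop_eq 254 (by omega) 1 a, linLoop_eq a 254 (by omega) 1]
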